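-- pv_equiv track=rewrite | github.com/shahRhyme007/REU-Project | updateCode__ORIGINAL.py | find_ones_heights
-- ===== SOURCE A (Python) =====
-- def find_ones_heights(pyramid):
--     """
--     Calculate the heights of all diagonal columns of '1's in the pyramid,
--     starting from the rightmost diagonal and moving left.
--
--     Args:
--         pyramid (list of lists): The pyramid structure.
--
--     Returns:
--         list: Heights of '1's in each diagonal from the rightmost to the leftmost.
--     """
--     num_rows = len(pyramid)
--     heights = []
--
--     # Start from the bottom row and traverse from right to left
--     for start_col in range(len(pyramid[-1]) - 1, -1, -1):  # Start from the last column
--         height = 0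
--         row, col = num_rows - 1, start_col  # Start at the bottom-most position
--
--         # Traverse the diagonal upwards-left
--         while row >= 0 and col >= 0:
--             if col < len(pyramid[row]) and pyramid[row][col] == '1':
--                 height += 1
--                 row -= 1  # Move up
--                 col -= 1  # Move left
--             else:
--                 break  # Stop if the cell is not '1' or out of bounds
--
--         # Append the height for the current diagonal
--         if height>0:
--             heights.append(height)
--
--     return heights
-- ===== SOURCE B (Python) =====
-- def find_ones_heights(pyramid):
--     # Single top-down DP sweep: dp[c] = length of the consecutive-'1' run ending
--     # at (row, c) coming down the up-left diagonal; answer reads the bottom row.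
--     prev = []
--     for row in pyramid:
--         cur = []
--         for c, cell in enumerate(row):
--             if cell == '1':
--                 cur.append(1 + (prev[c - 1] if 0 <= c - 1 < len(prev) else 0))
--             else:
--                 cur.append(0)
--         prev = cur
--     return [h for h in reversed(prev) if h > 0]
-- ===== Notes on version B (the rewrite author's own statement) =====
-- stated objective: alternative
-- what changed: Replaces the per-diagonal upward walks (restarting one while-loop from the bottom row for every start column) by a single top-down dynamic-programming sweep that carries, per column, the length of the consecutive-'1' run ending there along its up-left diagonal, then reads the bottom row right-to-left.
import Mathlib
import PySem

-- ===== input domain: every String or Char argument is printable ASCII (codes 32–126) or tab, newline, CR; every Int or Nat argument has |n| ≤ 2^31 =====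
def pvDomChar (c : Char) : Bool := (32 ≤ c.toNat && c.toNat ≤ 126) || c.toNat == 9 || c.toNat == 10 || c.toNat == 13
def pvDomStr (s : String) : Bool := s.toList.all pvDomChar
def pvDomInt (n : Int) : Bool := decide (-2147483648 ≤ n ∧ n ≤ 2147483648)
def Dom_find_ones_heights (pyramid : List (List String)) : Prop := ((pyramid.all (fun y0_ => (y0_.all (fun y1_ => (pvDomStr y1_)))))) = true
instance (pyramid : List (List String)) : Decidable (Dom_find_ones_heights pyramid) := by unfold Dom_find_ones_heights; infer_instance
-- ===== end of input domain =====

-- B replaces A's per-start-column upward diagonal walks by one top-down DP sweep over the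
-- rows; equivalence is proved for every non-empty pyramid (A raises IndexError on []).

-- ===== PORT A =====
-- the inner 'while row >= 0 and col >= 0: …' loop; fuel = number of rows suffices
-- since row starts at num_rows-1 and decreases by 1 each iteration
def climbA (pyramid : List (List String)) : Nat → Int → Int → Int → Int
  | 0, _, _, height => height
  | fuel + 1, row, col, height =>
    if row ≥ 0 ∧ col ≥ 0 then
      if col < ((PySem.List.pyGetD pyramid row []).length : Int) ∧
          PySem.List.pyGetD (PySem.List.pyGetD pyramid row []) col "" = "1" then
        climbA pyramid fuel (row - 1) (col - 1) (height + 1)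
      else height
    else height

def find_ones_heights (pyramid : List (List String)) : List Int :=
  let num_rows : Int := pyramid.length
  (PySem.List.pyRange (((PySem.List.pyGetD pyramid (-1) []).length : Int) - 1) (-1) (-1)).foldl
    (fun heights start_col =>
      let height := climbA pyramid pyramid.length (num_rows - 1) start_col 0
      if height > 0 then heights ++ [height] else heights) []

-- ===== PORT B =====
-- 'for c, cell in enumerate(row): cur.append(…)'
def rowDP (prev : List Int) (row : List String) : List Int :=
  (PySem.List.enumerate row 0).foldl
    (fun cur p =>
      if p.2 = "1" then
        cur ++ [1 + (if 0 ≤ p.1 - 1 ∧ p.1 - 1 < (prev.length : Int) then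
                       PySem.List.pyGetD prev (p.1 - 1) 0 else 0)]
      else cur ++ [0]) []

def find_ones_heights_alt (pyramid : List (List String)) : List Int :=
  let prev := pyramid.foldl rowDP []
  prev.reverse.filter (fun h => h > 0)

-- ===== PRECONDITION & SPEC =====
-- A evaluates pyramid[-1]: it raises IndexError exactly on the empty pyramid
def Pre_find_ones_heights (pyramid : List (List String)) : Prop := pyramid ≠ []
instance (pyramid : List (List String)) : Decidable (Pre_find_ones_heights pyramid) := by
  unfold Pre_find_ones_heights; infer_instance
def pvWitness_find_ones_heights : List (List String) := [["1", "0"], ["1", "1"]]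


def Spec_find_ones_heights (pyramid : List (List String)) (out : List Int) : Prop := out = find_ones_heights_alt pyramid
instance (pyramid : List (List String)) (out : List Int) : Decidable (Spec_find_ones_heights pyramid out) := by unfold Spec_find_ones_heights; infer_instance

-- ===== CLAIM (what is proved, stated in full; the proofs are below) =====
def Claim_equal_find_ones_heights : Prop := ∀ (pyramid : List (List String)), Dom_find_ones_heights pyramid → Pre_find_ones_heights pyramid → Spec_find_ones_heights pyramid (find_ones_heights pyramid)

-- ===== LEMMAS AND PROOFS =====

-- per-cell DP value of B
def dpCell (prev : List Int) (p : Int × String) : Int :=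
  if p.2 = "1" then
    1 + (if 0 ≤ p.1 - 1 ∧ p.1 - 1 < (prev.length : Int) then
           PySem.List.pyGetD prev (p.1 - 1) 0 else 0)
  else 0

lemma rowDP_foldl (prev : List Int) (l : List (Int × String)) (acc : List Int) :
    l.foldl (fun cur p =>
      if p.2 = "1" then
        cur ++ [1 + (if 0 ≤ p.1 - 1 ∧ p.1 - 1 < (prev.length : Int) then
                       PySem.List.pyGetD prev (p.1 - 1) 0 else 0)]
      else cur ++ [0]) acc = acc ++ l.map (dpCell prev) := by
  induction l generalizing acc with
  | nil => simp
  | cons p l ih =>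
    simp only [List.foldl_cons, List.map_cons]
    rw [ih]
    by_cases h : p.2 = "1" <;> simp [h, dpCell]

lemma rowDP_eq_map (prev : List Int) (row : List String) :
    rowDP prev row = (PySem.List.enumerate row 0).map (dpCell prev) := by
  unfold rowDP
  rw [rowDP_foldl]
  simp

lemma rowDP_length (prev : List Int) (row : List String) :
    (rowDP prev row).length = row.length := by
  simp [rowDP_eq_map, PySem.List.length_enumerate]

lemma rowDP_getD (prev : List Int) (row : List String) (c : Nat) (hc : c < row.length) :
    (rowDP prev row).getD c 0 = dpCell prev ((c : Int), row[c]) := by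
  rw [rowDP_eq_map]
  rw [List.getD_eq_getElem?_getD]
  rw [List.getElem?_map, PySem.List.getElem?_enumerate]
  simp [List.getElem?_eq_getElem hc]

lemma climbA_acc (pyramid : List (List String)) (fuel : Nat) :
    ∀ (row col height : Int),
      climbA pyramid fuel row col height = height + climbA pyramid fuel row col 0 := by
  induction fuel with
  | zero => intro row col height; simp [climbA]
  | succ f ih =>
    intro row col height
    simp only [climbA]
    split
    · split
      · rw [ih (row-1) (col-1) (height+1), ih (row-1) (col-1) (0+1)]; ring
      · simp
    · simp

lemma climbA_neg_col (pyramid : List (List String)) (fuel : Nat) (row : Int) (h : Int)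
    (col : Int) (hc : col < 0) : climbA pyramid fuel row col h = h := by
  cases fuel with
  | zero => simp [climbA]
  | succ f => simp only [climbA]; rw [if_neg]; omega

lemma climbA_neg_row (pyramid : List (List String)) (fuel : Nat) (col : Int) (h : Int)
    (row : Int) (hr : row < 0) : climbA pyramid fuel row col h = h := by
  cases fuel with
  | zero => simp [climbA]
  | succ f => simp only [climbA]; rw [if_neg]; omega

lemma pyGetD_append_left (qs : List (List String)) (lr : List String) (r : Int)
    (h0 : 0 ≤ r) (hr : r < (qs.length : Int)) :
    PySem.List.pyGetD (qs ++ [lr]) r [] = PySem.List.pyGetD qs r [] := by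
  have hrt : r.toNat < qs.length := by omega
  have hr' : r = ((r.toNat : Nat) : Int) := by omega
  rw [hr', PySem.List.pyGetD_natCast, PySem.List.pyGetD_natCast]
  rw [List.getD_eq_getElem?_getD, List.getD_eq_getElem?_getD,
      List.getElem?_append_left hrt]

lemma climbA_prefix (qs : List (List String)) (lr : List String) :
    ∀ (fuel : Nat) (row col h : Int), row < (qs.length : Int) →
      climbA (qs ++ [lr]) fuel row col h = climbA qs fuel row col h := by
  intro fuel
  induction fuel with
  | zero => intro row col h _; simp [climbA]
  | succ f ih =>
    intro row col h hrow
    simp only [climbA]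
    by_cases hg : row ≥ 0 ∧ col ≥ 0
    · rw [if_pos hg, if_pos hg]
      rw [pyGetD_append_left qs lr row hg.1 hrow]
      split
      · exact ih (row - 1) (col - 1) (h + 1) (by omega)
      · rfl
    · rw [if_neg hg, if_neg hg]

lemma pyGetD_row_append (qs : List (List String)) (lr : List String) :
    PySem.List.pyGetD (qs ++ [lr]) (qs.length : Int) [] = lr := by
  rw [PySem.List.pyGetD_natCast, List.getD_eq_getElem?_getD,
      List.getElem?_concat_length]
  rfl

-- main invariant: the DP value at bottom column c equals A's upward climb from (len-1, c)
lemma dp_eq_climb :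
    ∀ (qs : List (List String)) (fuel : Nat) (c : Nat), qs ≠ [] → qs.length ≤ fuel →
      climbA qs fuel ((qs.length : Int) - 1) (c : Int) 0 = (qs.foldl rowDP []).getD c 0 := by
  intro qs
  induction qs using List.reverseRecOn with
  | nil => intro _ _ hne _; exact absurd rfl hne
  | append_singleton qs' lr ih =>
    intro fuel c _ hfuel
    have hlen : (qs' ++ [lr]).length = qs'.length + 1 := by simp
    obtain ⟨f, rfl⟩ : ∃ f, fuel = f + 1 := ⟨fuel - 1, by omega⟩
    have hrow : ((qs' ++ [lr]).length : Int) - 1 = (qs'.length : Int) := by simp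
    rw [hrow]
    have hdp : (qs' ++ [lr]).foldl rowDP [] = rowDP (qs'.foldl rowDP []) lr := by
      simp [List.foldl_append]
    rw [hdp]
    set dq := qs'.foldl rowDP [] with hdq
    simp only [climbA]
    rw [if_pos ⟨Int.natCast_nonneg _, Int.natCast_nonneg _⟩]
    rw [pyGetD_row_append]
    by_cases hc : c < lr.length
    · have hcI : (c : Int) < (lr.length : Int) := by exact_mod_cast hc
      have hget : PySem.List.pyGetD lr (c : Int) "" = lr[c] := by
        rw [PySem.List.pyGetD_natCast]
        exact List.getD_eq_getElem lr "" hc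
      rw [rowDP_getD dq lr c hc]
      by_cases hone : lr[c] = "1"
      · rw [if_pos ⟨hcI, by rw [hget, hone]⟩]
        rw [climbA_acc]
        have hcell : dpCell dq ((c : Int), lr[c]) =
            1 + (if 0 ≤ (c : Int) - 1 ∧ (c : Int) - 1 < (dq.length : Int) then
                   PySem.List.pyGetD dq ((c : Int) - 1) 0 else 0) := by
          simp [dpCell, hone]
        rw [hcell]
        congr 1
        -- show climbA (qs'++[lr]) f (qs'.length-1) (c-1) 0 = the dq lookup
        by_cases hc0 : c = 0
        · subst hc0
          rw [climbA_neg_col _ _ _ _ _ (by norm_num)]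
          rw [if_neg (by norm_num)]
        · have hc1 : 1 ≤ c := Nat.one_le_iff_ne_zero.mpr hc0
          have hcast : (c : Int) - 1 = ((c - 1 : Nat) : Int) := by omega
          by_cases hq : qs' = []
          · subst hq
            rw [show ((([] : List (List String)).length : Int) - 1) = (-1 : Int) by simp]
            rw [climbA_neg_row _ _ _ _ _ (by norm_num)]
            have : dq = [] := by simp [hdq]
            rw [if_neg (by simp [this]; omega)]
          · rw [climbA_prefix qs' lr f _ _ _ (by have := List.length_pos_iff.mpr hq; omega)]
            rw [hcast]
            rw [ih f (c - 1) hq (by omega)]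
            by_cases hin : (c - 1 : Nat) < dq.length
            · rw [if_pos ⟨by omega, by exact_mod_cast hin⟩]
              rw [PySem.List.pyGetD_natCast]
            · rw [if_neg (by simp only [not_and, not_lt]; intro _; exact_mod_cast Nat.le_of_not_lt hin)]
              rw [List.getD_eq_default _ _ (by omega)]
      · rw [if_neg (by rw [hget]; tauto)]
        simp [dpCell, hone]
    · -- column beyond the bottom row: climb stops at once, dp lookup is out of range
      rw [if_neg (by intro hh; exact hc (by exact_mod_cast hh.1))]
      rw [List.getD_eq_default]
      rw [rowDP_length]; omega

-- the right-to-left collection loop of A builds the filtered reverse of the bottom-row DP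
lemma foldl_collect (v : Int → Int) (idxs : List Int) (acc : List Int) :
    idxs.foldl (fun heights start_col =>
      let height := v start_col
      if height > 0 then heights ++ [height] else heights) acc
    = acc ++ (idxs.map v).filter (fun h => h > 0) := by
  induction idxs generalizing acc with
  | nil => simp
  | cons x xs ih =>
    simp only [List.foldl_cons, List.map_cons, List.filter_cons]
    by_cases h : v x > 0 <;> simp [h, ih]

theorem find_ones_heights_spec : Claim_equal_find_ones_heights := by
  intro pyramid _ hpre
  unfold Spec_find_ones_heights find_ones_heights find_ones_heights_alt
  have hne : pyramid ≠ [] := hpre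
  set dp := pyramid.foldl rowDP [] with hdp
  have hlast : PySem.List.pyGetD pyramid (-1) [] = pyramid.getLast hne :=
    PySem.List.pyGetD_neg_one pyramid [] hne
  have hdplen : dp.length = (pyramid.getLast hne).length := by
    obtain ⟨qs', lr, rfl⟩ := pyramid.eq_nil_or_concat.resolve_left hne
    simp [hdp, List.foldl_append, rowDP_length]
  set m := (pyramid.getLast hne).length with hm
  rw [foldl_collect]
  rw [List.nil_append]
  have hmap : (PySem.List.pyRange ((m : Int) - 1) (-1) (-1)).map
      (fun start_col => climbA pyramid pyramid.length ((pyramid.length : Int) - 1) start_col 0)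
      = dp.reverse := by
    rw [PySem.List.pyRange_neg_one]
    have hab : (((m : Int) - 1) - (-1)).toNat = m := by omega
    rw [hab, List.map_map]
    apply List.ext_getElem
    · simp [hdplen]
    · intro k hk1 hk2
      simp only [List.getElem_map, List.getElem_range, Function.comp_apply]
      have hkm : k < m := by simpa using hk1
      have hcast : (m : Int) - 1 - (k : Int) = ((m - 1 - k : Nat) : Int) := by omega
      rw [hcast]
      rw [dp_eq_climb pyramid pyramid.length (m - 1 - k) hne le_rfl]
      rw [← hdp]
      rw [List.getElem_reverse]
      rw [List.getD_eq_getElem _ _ (by omega)]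
      congr 1
      omega
  rw [hlast, ← hm, hmap]
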